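-- pv_equiv track=rewrite | github.com/WalterCun/DevMind | core/agents/level2_specialist/qa.py | _classify_qa_task
-- ===== SOURCE A (Python) =====
-- def _classify_qa_task(task: str) -> str:
--     """Clasifica el tipo de tarea QA"""
--     task_lower = task.lower()
--
--     if any(kw in task_lower for kw in ["unit", "unitario", "pytest", "unittest"]):
--         return "unit"
--     elif any(kw in task_lower for kw in ["integración", "integration", "api", "endpoint"]):
--         return "integration"
--     elif any(kw in task_lower for kw in ["e2e", "end-to-end", "cypress", "selenium", "navegador"]):
--         return "e2e"
--     elif any(kw in task_lower for kw in ["coverage", "cobertura", "reporte"]):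
--         return "coverage"
--     return "general"
-- ===== SOURCE B (Python) =====
-- _LABELS = ["unit", "integration", "e2e", "coverage", "general"]
--
-- # flattened (keyword, priority) table; priority = index of the label
-- _KW = [
--     ("unit", 0), ("unitario", 0), ("pytest", 0), ("unittest", 0),
--     ("integración", 1), ("integration", 1), ("api", 1), ("endpoint", 1),
--     ("e2e", 2), ("end-to-end", 2), ("cypress", 2), ("selenium", 2), ("navegador", 2),
--     ("coverage", 3), ("cobertura", 3), ("reporte", 3),
-- ]
--
--
-- def _classify_qa_task(task: str) -> str:
--     """Clasifica la tarea QA con un solo barrido posicional de la cadena: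
--     en cada posición se mira qué palabra clave empieza allí y se conserva
--     la mejor prioridad vista; al final se devuelve su etiqueta."""
--     t = task.lower()
--     best = 4  # sentinel priority of "general"
--     for i in range(len(t)):
--         if best == 0:
--             break  # cannot improve further
--         for kw, pri in _KW:
--             if pri < best and t.startswith(kw, i):
--                 best = pri
--     return _LABELS[best]
-- ===== Notes on version B (the rewrite author's own statement) =====
-- stated objective: alternative
-- what changed: Inverts the loop nesting: instead of A's rule-major if/elif chain (one full substring search per keyword group), B makes a single position-major sweep over the lowered string, at each position checking which keywords start there and keeping the best (lowest) priority seen, with an early break once priority 0 is reached; the label is looked up by that priority at the end.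
import Mathlib
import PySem

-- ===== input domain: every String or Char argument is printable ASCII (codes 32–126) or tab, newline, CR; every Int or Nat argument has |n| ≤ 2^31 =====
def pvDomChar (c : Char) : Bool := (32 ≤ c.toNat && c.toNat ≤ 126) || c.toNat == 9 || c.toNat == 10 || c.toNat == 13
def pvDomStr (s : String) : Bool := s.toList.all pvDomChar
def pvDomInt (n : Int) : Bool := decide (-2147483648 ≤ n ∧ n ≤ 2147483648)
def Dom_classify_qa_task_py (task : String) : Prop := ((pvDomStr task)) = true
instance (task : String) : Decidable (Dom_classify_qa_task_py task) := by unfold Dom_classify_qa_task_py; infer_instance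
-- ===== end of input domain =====

-- B replaces A's rule-major if/elif chain by a single position-major scan of the string
-- that keeps the best (lowest) priority of any keyword starting at each position (alternative decomposition; same cost).

-- ===== PORT A =====
def classify_qa_task_py (task : String) : String :=
  let task_lower := PySem.Str.lower task
  if ["unit", "unitario", "pytest", "unittest"].any (fun kw => PySem.Str.isIn kw task_lower) then
    "unit"
  else if ["integración", "integration", "api", "endpoint"].any (fun kw => PySem.Str.isIn kw task_lower) then
    "integration"
  else if ["e2e", "end-to-end", "cypress", "selenium", "navegador"].any (fun kw => PySem.Str.isIn kw task_lower) then
    "e2e"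
  else if ["coverage", "cobertura", "reporte"].any (fun kw => PySem.Str.isIn kw task_lower) then
    "coverage"
  else
    "general"

-- ===== PORT B =====
def qaLabels : List String := ["unit", "integration", "e2e", "coverage", "general"]

-- flattened (keyword, priority) table; priority = index of the label
def qaKw : List (List Char × Nat) :=
  [ ("unit".toList, 0), ("unitario".toList, 0), ("pytest".toList, 0), ("unittest".toList, 0),
    ("integración".toList, 1), ("integration".toList, 1), ("api".toList, 1), ("endpoint".toList, 1),
    ("e2e".toList, 2), ("end-to-end".toList, 2), ("cypress".toList, 2), ("selenium".toList, 2), ("navegador".toList, 2),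
    ("coverage".toList, 3), ("cobertura".toList, 3), ("reporte".toList, 3) ]

-- the inner loop: improve `best` with every keyword that starts at the current position
def qaStep (l : List Char) (best : Nat) : Nat :=
  qaKw.foldl (fun b p => if p.2 < b ∧ p.1.isPrefixOf l then p.2 else b) best

-- the outer loop over positions i (here: suffixes), with the `best == 0` early break
def qaScan : List Char → Nat → Nat
  | [], best => best
  | c :: rest, best => if best = 0 then best else qaScan rest (qaStep (c :: rest) best)

def classify_qa_task_py_alt (task : String) : String :=
  -- _LABELS[best]: best ≤ 4 always (it starts at 4 and only decreases), so the "" default is never used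
  qaLabels.getD (qaScan (PySem.Str.lower task).toList 4) ""

-- ===== PRECONDITION & SPEC =====
def Spec_classify_qa_task_py (task : String) (out : String) : Prop := out = classify_qa_task_py_alt task
instance (task : String) (out : String) : Decidable (Spec_classify_qa_task_py task out) := by unfold Spec_classify_qa_task_py; infer_instance

-- ===== CLAIM =====
def Claim_equal_classify_qa_task_py : Prop := ∀ (task : String), Dom_classify_qa_task_py task → Spec_classify_qa_task_py task (classify_qa_task_py task)

-- ===== LEMMAS AND PROOFS =====

-- generalized folds for the two loops
def qaF (l : List Char) (ks : List (List Char × Nat)) (b : Nat) : Nat :=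
  ks.foldl (fun b p => if p.2 < b ∧ p.1.isPrefixOf l then p.2 else b) b

def qaG (l : List Char) (ks : List (List Char × Nat)) (a : Nat) : Nat :=
  ks.foldl (fun a p => if p.1.isPrefixOf l then min a p.2 else a) a

lemma qaF_min (l : List Char) : ∀ (ks : List (List Char × Nat)) (b a : Nat),
    qaF l ks (min b a) = min b (qaG l ks a) := by
  intro ks
  induction ks with
  | nil => intro b a; simp [qaF, qaG]
  | cons p ks ih =>
    intro b a
    by_cases h : p.1.isPrefixOf l
    · have htail := ih b (min a p.2)
      simp only [qaF, qaG, List.foldl_cons, h] at htail ⊢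
      have hacc : (if p.2 < min b a ∧ True then p.2 else min b a) = min b (min a p.2) := by
        simp only [and_true]; split_ifs <;> omega
      rw [hacc]
      simpa using htail
    · have htail := ih b a
      simp only [qaF, qaG, List.foldl_cons, h, Bool.false_eq_true, and_false, if_false] at htail ⊢
      simpa using htail

lemma qaG_le_iff (l : List Char) : ∀ (ks : List (List Char × Nat)) (a k : Nat),
    (qaG l ks a ≤ k ↔ a ≤ k ∨ ∃ p ∈ ks, p.2 ≤ k ∧ p.1 <+: l) := by
  intro ks
  induction ks with
  | nil => intro a k; simp [qaG]
  | cons p ks ih =>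
    intro a k
    by_cases h : p.1.isPrefixOf l
    · have hp : p.1 <+: l := List.isPrefixOf_iff_prefix.mp h
      simp only [qaG, List.foldl_cons, h, if_true]
      have := ih (min a p.2) k
      simp only [qaG] at this
      simp only [this]
      simp only [List.mem_cons]
      constructor
      · rintro (hm | ⟨q, hq, h1, h2⟩)
        · rcases min_le_iff.mp hm with h' | h'
          · exact Or.inl h'
          · exact Or.inr ⟨p, Or.inl rfl, h', hp⟩
        · exact Or.inr ⟨q, Or.inr hq, h1, h2⟩
      · rintro (ha | ⟨q, hq | hq, h1, h2⟩)
        · exact Or.inl (le_trans (min_le_left _ _) ha)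
        · exact Or.inl (le_trans (min_le_right _ _) (hq ▸ h1))
        · exact Or.inr ⟨q, hq, h1, h2⟩
    · have hp : ¬ p.1 <+: l := fun hc => h (List.isPrefixOf_iff_prefix.mpr hc)
      have := ih a k
      simp only [qaG] at this
      simp only [qaG, List.foldl_cons, h, Bool.false_eq_true, if_false, this]
      simp only [List.mem_cons]
      constructor
      · rintro (ha | ⟨q, hq, h1, h2⟩)
        · exact Or.inl ha
        · exact Or.inr ⟨q, Or.inr hq, h1, h2⟩
      · rintro (ha | ⟨q, hq | hq, h1, h2⟩)
        · exact Or.inl ha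
        · exact absurd (hq ▸ h2) hp
        · exact Or.inr ⟨q, hq, h1, h2⟩

-- the value qaScan computes, position by position
def qaBest : List Char → Nat
  | [] => 4
  | c :: rest => min (qaG (c :: rest) qaKw 4) (qaBest rest)

lemma qaBest_le4 : ∀ (l : List Char), qaBest l ≤ 4 := by
  intro l
  induction l with
  | nil => simp [qaBest]
  | cons c rest ih => exact le_trans (min_le_right _ _) ih

lemma qaStep_eq (l : List Char) (b : Nat) (hb : b ≤ 4) :
    qaStep l b = min b (qaG l qaKw 4) := by
  have : qaStep l b = qaF l qaKw (min b 4) := by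
    simp [qaStep, qaF, Nat.min_eq_left hb]
  rw [this, qaF_min]

lemma qaScan_eq : ∀ (l : List Char) (b : Nat), b ≤ 4 → qaScan l b = min b (qaBest l) := by
  intro l
  induction l with
  | nil => intro b hb; simp [qaScan, qaBest, Nat.min_eq_left hb]
  | cons c rest ih =>
    intro b hb
    simp only [qaScan]
    by_cases h0 : b = 0
    · simp [h0]
    · rw [if_neg h0, qaStep_eq _ _ hb, ih _ (le_trans (min_le_left _ _) hb), qaBest]
      omega

lemma qaBest_le_iff : ∀ (l : List Char) (k : Nat), k < 4 →
    (qaBest l ≤ k ↔ ∃ p ∈ qaKw, p.2 ≤ k ∧ p.1 <:+: l) := by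
  intro l
  induction l with
  | nil =>
    intro k hk
    simp only [qaBest]
    constructor
    · omega
    · rintro ⟨p, hp, h1, h2⟩
      rw [List.infix_nil] at h2
      fin_cases hp <;> simp_all
  | cons c rest ih =>
    intro k hk
    rw [qaBest, min_le_iff, qaG_le_iff, ih k hk]
    constructor
    · rintro ((h4 | ⟨p, hp, h1, h2⟩) | ⟨p, hp, h1, h2⟩)
      · omega
      · exact ⟨p, hp, h1, h2.isInfix⟩
      · exact ⟨p, hp, h1, h2.trans (List.suffix_cons c rest).isInfix⟩
    · rintro ⟨p, hp, h1, h2⟩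
      rcases List.infix_cons_iff.mp h2 with h | h
      · exact Or.inl (Or.inr ⟨p, hp, h1, h⟩)
      · exact Or.inr ⟨p, hp, h1, h⟩

-- ===== VERDICT =====
theorem classify_qa_task_py_spec : Claim_equal_classify_qa_task_py := by
  intro task _
  show classify_qa_task_py task = classify_qa_task_py_alt task
  have hb4 := qaBest_le4 (PySem.Str.lower task).toList
  have e0 : qaBest (PySem.Str.lower task).toList ≤ 0 ↔
      (["unit", "unitario", "pytest", "unittest"].any
        (fun kw => PySem.Str.isIn kw (PySem.Str.lower task)) = true) := by
    rw [qaBest_le_iff _ 0 (by omega)]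
    simp [qaKw, PySem.Chars.isIn_iff_infix]
  have e1 : qaBest (PySem.Str.lower task).toList ≤ 1 ↔
      ((["unit", "unitario", "pytest", "unittest"].any
        (fun kw => PySem.Str.isIn kw (PySem.Str.lower task)) = true) ∨
       (["integración", "integration", "api", "endpoint"].any
        (fun kw => PySem.Str.isIn kw (PySem.Str.lower task)) = true)) := by
    rw [qaBest_le_iff _ 1 (by omega)]
    simp [qaKw, PySem.Chars.isIn_iff_infix, or_assoc]
  have e2 : qaBest (PySem.Str.lower task).toList ≤ 2 ↔
      ((["unit", "unitario", "pytest", "unittest"].any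
        (fun kw => PySem.Str.isIn kw (PySem.Str.lower task)) = true) ∨
       (["integración", "integration", "api", "endpoint"].any
        (fun kw => PySem.Str.isIn kw (PySem.Str.lower task)) = true) ∨
       (["e2e", "end-to-end", "cypress", "selenium", "navegador"].any
        (fun kw => PySem.Str.isIn kw (PySem.Str.lower task)) = true)) := by
    rw [qaBest_le_iff _ 2 (by omega)]
    simp [qaKw, PySem.Chars.isIn_iff_infix, or_assoc]
  have e3 : qaBest (PySem.Str.lower task).toList ≤ 3 ↔
      ((["unit", "unitario", "pytest", "unittest"].any
        (fun kw => PySem.Str.isIn kw (PySem.Str.lower task)) = true) ∨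
       (["integración", "integration", "api", "endpoint"].any
        (fun kw => PySem.Str.isIn kw (PySem.Str.lower task)) = true) ∨
       (["e2e", "end-to-end", "cypress", "selenium", "navegador"].any
        (fun kw => PySem.Str.isIn kw (PySem.Str.lower task)) = true) ∨
       (["coverage", "cobertura", "reporte"].any
        (fun kw => PySem.Str.isIn kw (PySem.Str.lower task)) = true)) := by
    rw [qaBest_le_iff _ 3 (by omega)]
    simp [qaKw, PySem.Chars.isIn_iff_infix, or_assoc]
  simp only [classify_qa_task_py, classify_qa_task_py_alt]
  rw [qaScan_eq _ _ (le_refl 4), Nat.min_eq_right hb4]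
  by_cases c0 : (["unit", "unitario", "pytest", "unittest"].any
      (fun kw => PySem.Str.isIn kw (PySem.Str.lower task)) = true)
  · have hb : qaBest (PySem.Str.lower task).toList = 0 := by
      have := e0.mpr c0; omega
    rw [if_pos c0, hb]; rfl
  · by_cases c1 : (["integración", "integration", "api", "endpoint"].any
        (fun kw => PySem.Str.isIn kw (PySem.Str.lower task)) = true)
    · have hb : qaBest (PySem.Str.lower task).toList = 1 := by
        have h1 := e1.mpr (Or.inr c1)
        have h0 : ¬ qaBest (PySem.Str.lower task).toList ≤ 0 := fun h => c0 (e0.mp h)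
        omega
      rw [if_neg c0, if_pos c1, hb]; rfl
    · by_cases c2 : (["e2e", "end-to-end", "cypress", "selenium", "navegador"].any
          (fun kw => PySem.Str.isIn kw (PySem.Str.lower task)) = true)
      · have hb : qaBest (PySem.Str.lower task).toList = 2 := by
          have h2 := e2.mpr (Or.inr (Or.inr c2))
          have h1 : ¬ qaBest (PySem.Str.lower task).toList ≤ 1 := fun h => by
            rcases e1.mp h with h | h
            · exact c0 h
            · exact c1 h
          omega
        rw [if_neg c0, if_neg c1, if_pos c2, hb]; rfl
      · by_cases c3 : (["coverage", "cobertura", "reporte"].any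
            (fun kw => PySem.Str.isIn kw (PySem.Str.lower task)) = true)
        · have hb : qaBest (PySem.Str.lower task).toList = 3 := by
            have h3 := e3.mpr (Or.inr (Or.inr (Or.inr c3)))
            have h2 : ¬ qaBest (PySem.Str.lower task).toList ≤ 2 := fun h => by
              rcases e2.mp h with h | h | h
              · exact c0 h
              · exact c1 h
              · exact c2 h
            omega
          rw [if_neg c0, if_neg c1, if_neg c2, if_pos c3, hb]; rfl
        · have hb : qaBest (PySem.Str.lower task).toList = 4 := by
            have h3 : ¬ qaBest (PySem.Str.lower task).toList ≤ 3 := fun h => by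
              rcases e3.mp h with h | h | h | h
              · exact c0 h
              · exact c1 h
              · exact c2 h
              · exact c3 h
            omega
          rw [if_neg c0, if_neg c1, if_neg c2, if_neg c3, hb]; rfl
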